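-- pv_equiv track=rewrite | github.com/devingreene/4-cube-partial-order-count | unittest_tools.py | int2graph
-- ===== SOURCE A (Python) =====
-- dim = 4
--
-- nnodes=2**dim
--
-- nedges = 32
--
-- def int2graph(n:int)->dict:
--     assert 0 <= n < 2**nedges
--     graph = {k:set() for k in range(2**dim)}
--     for pos in range(0,nedges):
--         # See description in main.c
--         k,r = divmod(pos,nnodes//2)
--         rl = r % 2**k
--         rh = r - rl
--         rh *= 2
--         src = rh + rl
--         dst = src + 2**k
--         if n & 2**pos:
--             src,dst = dst,src
--         graph[src].add(dst)
--     return graph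
-- ===== SOURCE B (Python) =====
-- def int2graph(n: int) -> dict:
--     # Recursive doubling: build the 4-cube's labelled edge list by repeatedly
--     # duplicating the k-cube and joining the two copies, then orient each
--     # edge by its bit of n.
--     edges = []
--     for k in range(4):
--         half = 1 << k
--         edges = (edges
--                  + [(pos + half // 2, u + half, v + half) for (pos, u, v) in edges]
--                  + [(8 * k + u, u, u + half) for u in range(half)])
--     graph = {v: set() for v in range(16)}
--     for pos, src, dst in edges:
--         if n & (1 << pos):
--             graph[dst].add(src)
--         else:
--             graph[src].add(dst)
--     return graph
-- ===== Notes on version B (the rewrite author's own statement) =====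
-- stated objective: alternative
-- what changed: B abandons position decoding entirely: it builds the hypercube's labelled edge list by recursive doubling (duplicate the current subcube's edges with shifted labels and join the two copies), then orients each listed edge by its bit of n, instead of A's loop over the bit positions that decodes each position with divmod arithmetic into an edge.
import Mathlib
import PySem

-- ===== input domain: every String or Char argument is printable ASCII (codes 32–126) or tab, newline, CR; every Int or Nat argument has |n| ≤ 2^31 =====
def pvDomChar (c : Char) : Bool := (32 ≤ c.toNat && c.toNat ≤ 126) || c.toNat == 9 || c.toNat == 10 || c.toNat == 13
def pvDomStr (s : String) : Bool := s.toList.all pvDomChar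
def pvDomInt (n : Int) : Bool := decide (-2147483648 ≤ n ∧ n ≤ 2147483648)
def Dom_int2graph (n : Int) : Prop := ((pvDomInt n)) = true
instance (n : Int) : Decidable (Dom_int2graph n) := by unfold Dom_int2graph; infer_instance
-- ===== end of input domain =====

-- B replaces A's decode-each-bit-position loop by a recursive-doubling construction of the
-- hypercube's labelled edge list (duplicate the subcube and join the copies), then orients
-- each listed edge by its bit of n; same result, a different (alternative) algorithm.

-- ===== PORT A =====
def int2graph (n : Int) : List (Int × List Int) :=
  -- graph = {k: set() for k in range(2**dim)}
  let graph : PySem.Dict Int (PySem.Set Int) :=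
    (PySem.List.pyRange 0 16 1).foldl (fun d k => d.insert k PySem.Set.empty) PySem.Dict.empty
  -- for pos in range(0, nedges): …
  let graph :=
    (PySem.List.pyRange 0 32 1).foldl (fun g pos =>
      let k := PySem.Int.floordiv pos 8          -- k, r = divmod(pos, nnodes//2)
      let r := PySem.Int.mod pos 8
      let rl := PySem.Int.mod r ((2:Int) ^ k.toNat)   -- rl = r % 2**k
      let rh := r - rl                            -- rh = r - rl
      let rh := rh * 2                            -- rh *= 2
      let src := rh + rl                          -- src = rh + rl
      let dst := src + (2:Int) ^ k.toNat          -- dst = src + 2**k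
      -- if n & 2**pos: src, dst = dst, src
      let sd := if PySem.Int.band n ((2:Int) ^ pos.toNat) ≠ 0 then (dst, src) else (src, dst)
      -- graph[src].add(dst)
      g.modify sd.1 PySem.Set.empty (fun t => PySem.Set.add t sd.2)) graph
  graph.items

-- ===== PORT B =====
def int2graph_alt (n : Int) : List (Int × List Int) :=
  -- recursive doubling: edges of the (k+1)-cube = edges of the k-cube,
  -- plus a shifted copy, plus the connectors between the two copies
  let edges : List (Int × Int × Int) :=
    (PySem.List.pyRange 0 4 1).foldl (fun edges k =>
      let half : Int := (1:Int) <<< k.toNat                 -- half = 1 << k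
      edges
        ++ edges.map (fun e => (e.1 + PySem.Int.floordiv half 2, e.2.1 + half, e.2.2 + half))
        ++ (PySem.List.pyRange 0 half 1).map (fun u => (8 * k + u, u, u + half))) []
  -- graph = {v: set() for v in range(16)}
  let graph : PySem.Dict Int (PySem.Set Int) :=
    (PySem.List.pyRange 0 16 1).foldl (fun d v => d.insert v PySem.Set.empty) PySem.Dict.empty
  -- for pos, src, dst in edges: orient by bit pos of n
  let graph :=
    edges.foldl (fun g e =>
      if PySem.Int.band n ((1:Int) <<< e.1.toNat) ≠ 0 then
        g.modify e.2.2 PySem.Set.empty (fun t => PySem.Set.add t e.2.1)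
      else
        g.modify e.2.1 PySem.Set.empty (fun t => PySem.Set.add t e.2.2)) graph
  graph.items

-- ===== PRECONDITION & SPEC =====
-- Pre_ excludes exactly the inputs on which A's leading assert raises AssertionError.
def Pre_int2graph (n : Int) : Prop := 0 ≤ n ∧ n < 4294967296
instance (n : Int) : Decidable (Pre_int2graph n) := by unfold Pre_int2graph; infer_instance
def pvWitness_int2graph : Int := 5

def Spec_int2graph (n : Int) (out : List (Int × List Int)) : Prop := out = int2graph_alt n
instance (n : Int) (out : List (Int × List Int)) : Decidable (Spec_int2graph n out) := by unfold Spec_int2graph; infer_instance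

-- ===== CLAIM (what is proved, stated in full; the proofs are below) =====
def Claim_equal_int2graph : Prop := ∀ (n : Int), Dom_int2graph n → Pre_int2graph n → Spec_int2graph n (int2graph n)

-- ===== LEMMAS AND PROOFS =====

-- the common shape of both final loops: orient edge e by bit e.1 of n and add it to the dict
def pvStep (n : Int) (g : PySem.Dict Int (PySem.Set Int)) (e : Int × Int × Int) :
    PySem.Dict Int (PySem.Set Int) :=
  if PySem.Int.band n ((1:Int) <<< e.1.toNat) ≠ 0 then
    g.modify e.2.2 PySem.Set.empty (fun t => PySem.Set.add t e.2.1)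
  else
    g.modify e.2.1 PySem.Set.empty (fun t => PySem.Set.add t e.2.2)

-- key (the node receiving the add) and value (the node added) of edge e under n
def pvK (n : Int) (e : Int × Int × Int) : Int :=
  if PySem.Int.band n ((1:Int) <<< e.1.toNat) ≠ 0 then e.2.2 else e.2.1
def pvV (n : Int) (e : Int × Int × Int) : Int :=
  if PySem.Int.band n ((1:Int) <<< e.1.toNat) ≠ 0 then e.2.1 else e.2.2

theorem pvStep_eq (n : Int) (g : PySem.Dict Int (PySem.Set Int)) (e : Int × Int × Int) :
    pvStep n g e = g.modify (pvK n e) PySem.Set.empty (fun t => PySem.Set.add t (pvV n e)) := by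
  unfold pvStep pvK pvV; split <;> rfl

-- the initial dict {0:∅, …, 15:∅}
def pvD0 : PySem.Dict Int (PySem.Set Int) :=
  (PySem.List.pyRange 0 16 1).foldl (fun d k => d.insert k PySem.Set.empty) PySem.Dict.empty

-- A's decode of one bit position into a labelled edge
def pvTripleA (pos : Int) : Int × Int × Int :=
  let k := PySem.Int.floordiv pos 8
  let r := PySem.Int.mod pos 8
  let rl := PySem.Int.mod r ((2:Int) ^ k.toNat)
  let rh := (r - rl) * 2
  let src := rh + rl
  (pos, src, src + (2:Int) ^ k.toNat)

def pvLA : List (Int × Int × Int) := (PySem.List.pyRange 0 32 1).map pvTripleA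

def pvLB : List (Int × Int × Int) :=
  (PySem.List.pyRange 0 4 1).foldl (fun edges k =>
    let half : Int := (1:Int) <<< k.toNat
    edges
      ++ edges.map (fun e => (e.1 + PySem.Int.floordiv half 2, e.2.1 + half, e.2.2 + half))
      ++ (PySem.List.pyRange 0 half 1).map (fun u => (8 * k + u, u, u + half))) []

theorem pv_A_shape (n : Int) : int2graph n = (pvLA.foldl (pvStep n) pvD0).items := by
  simp only [int2graph, pvLA, List.foldl_map]
  refine congrArg PySem.Dict.items ?_
  apply PySem.List.foldl_congr_mem
  intro g pos _
  simp only [pvStep, pvTripleA, Int.shiftLeft_eq, one_mul]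
  split <;> rfl

theorem pv_B_shape (n : Int) : int2graph_alt n = (pvLB.foldl (pvStep n) pvD0).items := rfl

-- the fold of per-key modifies, characterised per key of the dict
theorem pv_items_foldl_modify (K V : Int × Int × Int → Int) :
    ∀ (L : List (Int × Int × Int)) (d : PySem.Dict Int (PySem.Set Int)),
      d.keys.Nodup → (∀ e ∈ L, d.contains (K e) = true) →
      (L.foldl (fun g e => g.modify (K e) PySem.Set.empty (fun t => PySem.Set.add t (V e))) d).items
        = d.items.map (fun kv =>
            (kv.1, L.foldl (fun s e => if K e == kv.1 then PySem.Set.add s (V e) else s) kv.2)) := by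
  intro L
  induction L with
  | nil => intro d _ _; simp
  | cons e t ih =>
      intro d hnd hc
      have hce : d.contains (K e) = true := hc e List.mem_cons_self
      have hmod : d.modify (K e) PySem.Set.empty (fun s => PySem.Set.add s (V e))
          = d.insert (K e) (PySem.Set.add (d.getD (K e) PySem.Set.empty) (V e)) := rfl
      have hnd' : (d.modify (K e) PySem.Set.empty (fun s => PySem.Set.add s (V e))).keys.Nodup := by
        rw [hmod, PySem.Dict.keys_insert_of_contains _ _ hce]; exact hnd
      have hc' : ∀ x ∈ t,
          (d.modify (K e) PySem.Set.empty (fun s => PySem.Set.add s (V e))).contains (K x) = true := by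
        intro x hx
        rw [PySem.Dict.contains_modify]
        simp [hc x (List.mem_cons_of_mem _ hx)]
      simp only [List.foldl_cons]
      rw [ih _ hnd' hc']
      rw [show (d.modify (K e) PySem.Set.empty (fun s => PySem.Set.add s (V e))).items
            = d.items.map (fun p => if p.1 == K e
                then (K e, PySem.Set.add (d.getD (K e) PySem.Set.empty) (V e)) else p) from
          hmod ▸ PySem.Dict.items_insert_of_contains _ _ hce]
      rw [List.map_map]
      apply List.map_congr_left
      rintro ⟨k, s⟩ hmem
      by_cases hk : k = K e
      · subst hk
        simp [Function.comp]
        rw [PySem.Dict.getD_of_mem_items d hmem hnd]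
      · have h1 : (k == K e) = false := by simpa using hk
        have h2 : (K e == k) = false := by simpa using (Ne.symm hk)
        simp [Function.comp, h1, h2]

-- a fold whose step is the identity off a filter is the fold of the filtered list
theorem pv_foldl_filter {α β : Type} (f : α → β → α) (p : β → Bool) :
    ∀ (L : List β), (∀ e ∈ L, p e = false → ∀ a, f a e = a) →
      ∀ a, L.foldl f a = (L.filter p).foldl f a := by
  intro L
  induction L with
  | nil => intro _ _; rfl
  | cons e t ih =>
      intro h a
      have ih' := ih (fun x hx => h x (List.mem_cons_of_mem _ hx))
      cases hp : p e with
      | false => simp [hp, h e List.mem_cons_self hp a, ih']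
      | true => simp [hp, ih']

-- incidence of edge e to node k (independent of n)
def pvInc (k : Int) (e : Int × Int × Int) : Bool := e.2.1 == k || e.2.2 == k

theorem pv_offkey (n k : Int) (e : Int × Int × Int) (h : pvInc k e = false) (s : PySem.Set Int) :
    (if pvK n e == k then PySem.Set.add s (pvV n e) else s) = s := by
  unfold pvInc at h
  simp only [Bool.or_eq_false_iff, beq_eq_false_iff_ne] at h
  have : (pvK n e == k) = false := by
    unfold pvK; split <;> simp [h.1, h.2]
  simp [this]

theorem pv_per_key (n k : Int) (hf : pvLA.filter (pvInc k) = pvLB.filter (pvInc k))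
    (s : PySem.Set Int) :
    pvLA.foldl (fun s e => if pvK n e == k then PySem.Set.add s (pvV n e) else s) s
      = pvLB.foldl (fun s e => if pvK n e == k then PySem.Set.add s (pvV n e) else s) s := by
  rw [pv_foldl_filter _ (pvInc k) pvLA (fun e _ he a => pv_offkey n k e he a) s,
      pv_foldl_filter _ (pvInc k) pvLB (fun e _ he a => pv_offkey n k e he a) s, hf]

theorem pv_contains_of_all (n : Int) (L : List (Int × Int × Int))
    (h : L.all (fun e => pvD0.contains e.2.1 && pvD0.contains e.2.2) = true) :
    ∀ e ∈ L, pvD0.contains (pvK n e) = true := by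
  intro e he
  have := List.all_eq_true.mp h e he
  simp only [Bool.and_eq_true] at this
  unfold pvK; split
  · exact this.2
  · exact this.1

-- ===== VERDICT (by name: the statement is the Claim_ definition above) =====
theorem int2graph_spec : Claim_equal_int2graph := by
  intro n _ _
  show int2graph n = int2graph_alt n
  rw [pv_A_shape, pv_B_shape]
  have hstep : ∀ (L : List (Int × Int × Int)),
      L.foldl (pvStep n) pvD0
        = L.foldl (fun g e => g.modify (pvK n e) PySem.Set.empty
            (fun t => PySem.Set.add t (pvV n e))) pvD0 := by
    intro L
    apply PySem.List.foldl_congr_mem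
    intro g e _
    exact pvStep_eq n g e
  rw [hstep pvLA, hstep pvLB]
  have hnd : pvD0.keys.Nodup := by decide
  rw [pv_items_foldl_modify (pvK n) (pvV n) pvLA pvD0 hnd
        (pv_contains_of_all n pvLA (by decide)),
      pv_items_foldl_modify (pvK n) (pvV n) pvLB pvD0 hnd
        (pv_contains_of_all n pvLB (by decide))]
  have hitems : pvD0.items =
      [((0:Int), ([]:List Int)), (1, []), (2, []), (3, []), (4, []), (5, []), (6, []), (7, []),
       (8, []), (9, []), (10, []), (11, []), (12, []), (13, []), (14, []), (15, [])] := by decide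
  rw [hitems]
  apply List.map_congr_left
  rintro ⟨k, s⟩ hmem
  fin_cases hmem <;>
    exact congrArg (Prod.mk _) (pv_per_key n _ (by decide) _)
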